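-- pv_equiv track=rewrite | github.com/xionggithub/watermarkdetect | testVideoList-sift+RANSAC 2/runPyAndShell/water_mask_find_sift+filterInvert.py | wmdr_getCombinRectFromRects
-- ===== SOURCE A (Python) =====
-- def wmdr_getCombinRectFromRects(rects):
--     combinRect = [0, 0 , 0 ,0]
--     startX  = 0;
--     endX    = 1000000;
--     startY  = 0;
--     endY    = 1000000;
--     for rect in rects:
--         if rect[0] > startX:    startX = rect[0]
--         if rect[1] > startY:    startY = rect[1]
--         if rect[2] < endX:    endX = rect[2]
--         if rect[3] < endY:    endY = rect[3]
--     combinRect = [startX, startY, endX, endY]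
--     if startX >= endX or startY >= endY:
--         combinRect = [0, 0 , 0 ,0]
--     return combinRect
-- ===== SOURCE B (Python) =====
-- def _wmdr_shrink(rects, lo, hi):
--     # intersection box of rects[lo:hi] by balanced divide and conquer
--     if hi - lo == 0:
--         return [0, 0, 1000000, 1000000]
--     if hi - lo == 1:
--         r = rects[lo]
--         return [r[0], r[1], r[2], r[3]]
--     mid = (lo + hi) // 2
--     a = _wmdr_shrink(rects, lo, mid)
--     b = _wmdr_shrink(rects, mid, hi)
--     return [max(a[0], b[0]), max(a[1], b[1]), min(a[2], b[2]), min(a[3], b[3])]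
--
-- def wmdr_getCombinRectFromRects(rects):
--     rects = list(rects)
--     box = _wmdr_shrink(rects, 0, len(rects))
--     startX = max(0, box[0])
--     startY = max(0, box[1])
--     endX = min(1000000, box[2])
--     endY = min(1000000, box[3])
--     if startX >= endX or startY >= endY:
--         return [0, 0, 0, 0]
--     return [startX, startY, endX, endY]
-- ===== Notes on version B (the rewrite author's own statement) =====
-- stated objective: alternative
-- what changed: Replaces A's single left-to-right loop mutating four scalar bounds by a balanced divide-and-conquer that recursively intersects whole rects over index ranges (correct because the intersection combine is associative) and clamps the result to the initial 0/1000000 frame, followed by the same degeneracy check.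
import Mathlib
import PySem

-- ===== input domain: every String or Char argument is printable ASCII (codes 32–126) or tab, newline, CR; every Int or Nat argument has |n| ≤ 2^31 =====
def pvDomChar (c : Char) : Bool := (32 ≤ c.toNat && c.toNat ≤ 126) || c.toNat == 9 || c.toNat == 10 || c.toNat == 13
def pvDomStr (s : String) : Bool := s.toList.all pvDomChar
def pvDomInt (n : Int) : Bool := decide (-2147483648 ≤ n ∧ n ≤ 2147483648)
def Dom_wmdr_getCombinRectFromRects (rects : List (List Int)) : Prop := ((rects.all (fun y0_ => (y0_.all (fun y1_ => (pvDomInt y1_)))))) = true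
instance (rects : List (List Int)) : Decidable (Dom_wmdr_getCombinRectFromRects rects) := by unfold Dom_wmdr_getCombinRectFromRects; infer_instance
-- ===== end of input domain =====

-- B replaces A's single left-to-right mutating loop by a balanced divide-and-conquer
-- intersection of index ranges followed by a clamp to the initial 0/1000000 frame (same O(n) cost).


-- ===== PORT A =====
-- rect[i] with 0 ≤ i < 4 is ported as List.getD (exact under Pre_, which guarantees length ≥ 4);
-- the loop body is named pvStepA, the loop itself is a foldl over the same 4-tuple state.
def pvStepA (s : Int × Int × Int × Int) (rect : List Int) : Int × Int × Int × Int :=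
  let sx := if rect.getD 0 0 > s.1 then rect.getD 0 0 else s.1
  let sy := if rect.getD 1 0 > s.2.1 then rect.getD 1 0 else s.2.1
  let ex := if rect.getD 2 0 < s.2.2.1 then rect.getD 2 0 else s.2.2.1
  let ey := if rect.getD 3 0 < s.2.2.2 then rect.getD 3 0 else s.2.2.2
  (sx, sy, ex, ey)

def wmdr_getCombinRectFromRects (rects : List (List Int)) : List Int :=
  let st := rects.foldl pvStepA (0, 0, 1000000, 1000000)
  if st.1 ≥ st.2.2.1 ∨ st.2.1 ≥ st.2.2.2 then [0, 0, 0, 0]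
  else [st.1, st.2.1, st.2.2.1, st.2.2.2]

-- ===== PORT B =====
-- _wmdr_shrink: rects[lo] → getD lo [], r[i] → getD i 0 (exact under Pre_ / in-range recursion)
def pvShrink (rects : List (List Int)) (lo hi : Nat) : List Int :=
  if hi - lo = 0 then [0, 0, 1000000, 1000000]
  else if hi - lo = 1 then
    let r := rects.getD lo []
    [r.getD 0 0, r.getD 1 0, r.getD 2 0, r.getD 3 0]
  else
    let mid := (lo + hi) / 2
    let a := pvShrink rects lo mid
    let b := pvShrink rects mid hi
    [max (a.getD 0 0) (b.getD 0 0), max (a.getD 1 0) (b.getD 1 0),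
     min (a.getD 2 0) (b.getD 2 0), min (a.getD 3 0) (b.getD 3 0)]
termination_by hi - lo
decreasing_by all_goals omega

def wmdr_getCombinRectFromRects_alt (rects : List (List Int)) : List Int :=
  let box := pvShrink rects 0 rects.length
  let startX := max 0 (box.getD 0 0)
  let startY := max 0 (box.getD 1 0)
  let endX := min 1000000 (box.getD 2 0)
  let endY := min 1000000 (box.getD 3 0)
  if startX ≥ endX ∨ startY ≥ endY then [0, 0, 0, 0]
  else [startX, startY, endX, endY]

-- ===== PRECONDITION & SPEC =====
-- Pre_ excludes exactly the rects with fewer than four entries, on which Python A raises IndexError.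
def Pre_wmdr_getCombinRectFromRects (rects : List (List Int)) : Prop :=
  ∀ r ∈ rects, 4 ≤ r.length
instance (rects : List (List Int)) : Decidable (Pre_wmdr_getCombinRectFromRects rects) := by unfold Pre_wmdr_getCombinRectFromRects; infer_instance
def pvWitness_wmdr_getCombinRectFromRects : List (List Int) := [[1, 2, 10, 12], [0, 3, 9, 20]]
def Spec_wmdr_getCombinRectFromRects (rects : List (List Int)) (out : List Int) : Prop := out = wmdr_getCombinRectFromRects_alt rects
instance (rects : List (List Int)) (out : List Int) : Decidable (Spec_wmdr_getCombinRectFromRects rects out) := by unfold Spec_wmdr_getCombinRectFromRects; infer_instance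

-- ===== CLAIM (what is proved, stated in full; the proofs are below) =====
def Claim_equal_wmdr_getCombinRectFromRects : Prop := ∀ (rects : List (List Int)), Dom_wmdr_getCombinRectFromRects rects → Pre_wmdr_getCombinRectFromRects rects → Spec_wmdr_getCombinRectFromRects rects (wmdr_getCombinRectFromRects rects)

-- ===== LEMMAS AND PROOFS =====
-- Invariant: A's fold over the segment rects[lo:hi], started from a state inside the initial
-- frame (startX,startY ≥ 0, endX,endY ≤ 1000000), equals that state combined with the
-- divide-and-conquer intersection pvShrink of the same segment.
theorem shrink_fold (n : Nat) : ∀ (rects : List (List Int)) (lo hi : Nat), hi - lo = n → hi ≤ rects.length →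
    ∀ sx sy ex ey : Int, 0 ≤ sx → 0 ≤ sy → ex ≤ 1000000 → ey ≤ 1000000 →
    ((rects.drop lo).take n).foldl pvStepA (sx, sy, ex, ey)
    = (max sx ((pvShrink rects lo hi).getD 0 0),
       max sy ((pvShrink rects lo hi).getD 1 0),
       min ex ((pvShrink rects lo hi).getD 2 0),
       min ey ((pvShrink rects lo hi).getD 3 0)) := by
  induction n using Nat.strong_induction_on with
  | _ n ih =>
    intro rects lo hi hn hle sx sy ex ey hsx hsy hex hey
    match n, hn with
    | 0, hn =>
      rw [pvShrink, if_pos hn]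
      simp only [List.take_zero, List.foldl_nil, List.getD, List.getElem?_cons_zero,
        List.getElem?_cons_succ, Option.getD_some]
      exact Prod.ext (max_eq_left hsx).symm (Prod.ext (max_eq_left hsy).symm
        (Prod.ext (min_eq_left hex).symm (min_eq_left hey).symm))
    | 1, hn =>
      have hlo : lo < rects.length := by omega
      have hdrop : rects.drop lo = rects[lo] :: rects.drop (lo + 1) :=
        (List.getElem_cons_drop hlo).symm
      rw [pvShrink]
      simp only [hn, hdrop, List.take_succ_cons, List.take_zero,
        List.foldl_cons, List.foldl_nil]
      have hgd : rects.getD lo [] = rects[lo] := by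
        simp [List.getD, List.getElem?_eq_getElem hlo]
      rw [hgd]
      simp only [pvStepA]
      refine Prod.ext ?_ (Prod.ext ?_ (Prod.ext ?_ ?_)) <;> simp <;> omega
    | (m+2), hn =>
      have h2 : 2 ≤ hi - lo := by omega
      set mid := (lo + hi) / 2 with hmid
      have hlm : lo < mid := by omega
      have hmh : mid < hi := by omega
      rw [pvShrink]
      have h0 : ¬ (hi - lo = 0) := by omega
      have h1 : ¬ (hi - lo = 1) := by omega
      simp only [h0, h1, ← hmid]
      -- split the segment
      have hsplit : (rects.drop lo).take (m+2)
          = (rects.drop lo).take (mid - lo) ++ (rects.drop mid).take (hi - mid) := by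
        have : m + 2 = (mid - lo) + (hi - mid) := by omega
        rw [this, List.take_add, List.drop_drop, Nat.add_sub_cancel' hlm.le]
      rw [hsplit, List.foldl_append]
      rw [ih (mid - lo) (by omega) rects lo mid rfl (by omega) sx sy ex ey hsx hsy hex hey]
      rw [ih (hi - mid) (by omega) rects mid hi rfl (by omega) _ _ _ _
        (le_trans hsx (le_max_left _ _)) (le_trans hsy (le_max_left _ _))
        (le_trans (min_le_left _ _) hex) (le_trans (min_le_left _ _) hey)]
      simp only [List.getD]
      refine Prod.ext ?_ (Prod.ext ?_ (Prod.ext ?_ ?_)) <;> simp [max_assoc, min_assoc]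

-- ===== VERDICT (by name: the statement is the Claim_ definition above) =====
theorem wmdr_getCombinRectFromRects_spec : Claim_equal_wmdr_getCombinRectFromRects := by
  intro rects _ _
  unfold Spec_wmdr_getCombinRectFromRects wmdr_getCombinRectFromRects wmdr_getCombinRectFromRects_alt
  have h := shrink_fold rects.length rects 0 rects.length (by omega) (le_refl _)
    0 0 1000000 1000000 (le_refl _) (le_refl _) (le_refl _) (le_refl _)
  simp only [List.drop_zero, List.take_length] at h
  rw [h]
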